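-- pv_equiv track=rewrite | github.com/shreyjindal81/CSE-331 | CC5/solution.py | check_walls_cover
-- ===== SOURCE A (Python) =====
-- from typing import List
--
-- def check_walls_cover(walls: List[int]) -> List[int]:
--     """
--     finds the number of visible walls
--     INPUT : list[int] the height of walls
--     OUTPUT : list[int] corresponding number of visible walls
--     TIME COMPLEXITY :  O(n)
--     SPACE COMPLEXITY : O(n)
--     """
--     stack = []
--     for i in range(len(walls)):
--         m = walls[i]
--         n = 0
--         for j in range(i, len(walls)):
--             if walls[j] > m:
--                 n += 1
--                 m = walls[j]
--         stack.append(n)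
--     return stack
-- ===== SOURCE B (Python) =====
-- from typing import List
--
-- def check_walls_cover(walls: List[int]) -> List[int]:
--     # One right-to-left pass with a monotonic stack: pop values <= current,
--     # the remaining stack size is the number of visible walls from here.
--     out = []
--     stack = []
--     for x in reversed(walls):
--         while stack and stack[-1] <= x:
--             stack.pop()
--         out.append(len(stack))
--         stack.append(x)
--     out.reverse()
--     return out
-- ===== Notes on version B (the rewrite author's own statement) =====
-- stated objective: faster
-- what changed: Replaced the quadratic rescan of every suffix by a single right-to-left pass with a monotonic stack: popping values <= the current wall leaves exactly the strictly increasing records visible from it.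
import Mathlib
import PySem

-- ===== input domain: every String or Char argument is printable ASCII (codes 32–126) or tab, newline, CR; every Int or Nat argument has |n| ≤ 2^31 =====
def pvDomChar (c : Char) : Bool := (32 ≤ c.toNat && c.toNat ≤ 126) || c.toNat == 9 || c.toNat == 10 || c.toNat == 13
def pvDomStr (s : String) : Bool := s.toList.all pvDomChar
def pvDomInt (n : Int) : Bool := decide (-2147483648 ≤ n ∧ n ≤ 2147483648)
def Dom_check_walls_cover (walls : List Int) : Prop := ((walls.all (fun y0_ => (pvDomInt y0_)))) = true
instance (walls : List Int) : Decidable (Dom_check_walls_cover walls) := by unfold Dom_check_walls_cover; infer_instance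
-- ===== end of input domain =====

-- B replaces A's quadratic per-suffix rescan by one right-to-left monotonic-stack pass (objective: faster, asymptotic).

-- ===== PORT A =====
-- A: for each i, rescan walls[i:] counting strictly increasing records above walls[i].
-- Loop indices i, j are always in range, so pyGetD is exact here.
def check_walls_cover (walls : List Int) : List Int :=
  (PySem.List.pyRange 0 (walls.length : Int) 1).foldl
    (fun stack i =>
      let p : Int × Int :=
        (PySem.List.pyRange i (walls.length : Int) 1).foldl
          (fun (p : Int × Int) j =>
            if PySem.List.pyGetD walls j 0 > p.1 then (PySem.List.pyGetD walls j 0, p.2 + 1)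
            else p)
          (PySem.List.pyGetD walls i 0, 0)
      stack ++ [p.2])
    []

-- ===== PORT B =====
-- B: one pass over reversed(walls); the while-pop loop is the dropWhile, stack top kept at the head;
-- out is built back-to-front (Python's append-then-reverse), so the accumulator is returned directly.
def check_walls_cover_alt (walls : List Int) : List Int :=
  (walls.reverse.foldl
    (fun (acc : List Int × List Int) x =>
      let st := acc.2.dropWhile (fun y => decide (y ≤ x))
      (((st.length : Int)) :: acc.1, x :: st))
    ([], [])).1

-- ===== PRECONDITION & SPEC =====
def Spec_check_walls_cover (walls : List Int) (out : List Int) : Prop := out = check_walls_cover_alt walls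
instance (walls : List Int) (out : List Int) : Decidable (Spec_check_walls_cover walls out) := by unfold Spec_check_walls_cover; infer_instance

-- ===== CLAIM (what is proved, stated in full; the proofs are below) =====
def Claim_equal_check_walls_cover : Prop := ∀ (walls : List Int), Dom_check_walls_cover walls → Spec_check_walls_cover walls (check_walls_cover walls)

-- ===== LEMMAS AND PROOFS =====

-- number of strictly increasing records of l above the running maximum m
def pvCountRec (m : Int) : List Int → Nat
  | [] => 0
  | w :: l => if m < w then pvCountRec w l + 1 else pvCountRec m l

-- the common specification: for each suffix x :: xs, the record count of xs above x
def pvSpecOut : List Int → List Int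
  | [] => []
  | x :: xs => ((pvCountRec x xs : Int)) :: pvSpecOut xs

-- B's stack after the suffix xs has been processed (top at head)
def pvStk : List Int → List Int
  | [] => []
  | x :: xs => x :: (pvStk xs).dropWhile (fun y => decide (y ≤ x))

lemma pv_dropWhile_dropWhile (l : List Int) (a b : Int) (h : a ≤ b) :
    (l.dropWhile (fun y => decide (y ≤ a))).dropWhile (fun y => decide (y ≤ b))
      = l.dropWhile (fun y => decide (y ≤ b)) := by
  induction l with
  | nil => rfl
  | cons y ys ih =>
    by_cases hy : y ≤ a
    · simp [hy, le_trans hy h, ih]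
    · simp [List.dropWhile_cons, hy]

lemma pv_stk_count (xs : List Int) (m : Int) :
    ((pvStk xs).dropWhile (fun y => decide (y ≤ m))).length = pvCountRec m xs := by
  induction xs generalizing m with
  | nil => rfl
  | cons x xs ih =>
    by_cases h : x ≤ m
    · have hnm : ¬ m < x := not_lt.mpr h
      simp [pvStk, pvCountRec, h, hnm,
        pv_dropWhile_dropWhile (pvStk xs) x m h, ih]
    · have hm : m < x := not_le.mp h
      simp [pvStk, pvCountRec, h, hm, ih]

lemma pv_B_foldr (xs : List Int) :
    xs.foldr
      (fun x (acc : List Int × List Int) =>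
        let st := acc.2.dropWhile (fun y => decide (y ≤ x))
        (((st.length : Int)) :: acc.1, x :: st))
      ([], [])
      = (pvSpecOut xs, pvStk xs) := by
  induction xs with
  | nil => rfl
  | cons x xs ih => simp [List.foldr_cons, ih, pvSpecOut, pvStk, pv_stk_count]

lemma pv_B_eq (walls : List Int) : check_walls_cover_alt walls = pvSpecOut walls := by
  unfold check_walls_cover_alt
  rw [List.foldl_reverse, pv_B_foldr]

-- A's inner loop is pvCountRec
lemma pv_inner_fold (l : List Int) (m n : Int) :
    (l.foldl (fun (p : Int × Int) w => if w > p.1 then (w, p.2 + 1) else p) (m, n)).2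
      = n + (pvCountRec m l : Int) := by
  induction l generalizing m n with
  | nil => simp [pvCountRec]
  | cons w l ih =>
    simp only [List.foldl_cons, gt_iff_lt, pvCountRec]
    by_cases h : m < w
    · rw [if_pos h, if_pos h, ih]
      push_cast
      ring
    · rw [if_neg h, if_neg h, ih]

lemma pv_outer (walls : List Int) :
    ∀ (n k : Nat), walls.length = k + n → ∀ acc : List Int,
    (PySem.List.pyRange (k : Int) (walls.length : Int) 1).foldl
      (fun stack i =>
        let p : Int × Int :=
          (PySem.List.pyRange i (walls.length : Int) 1).foldl
            (fun (p : Int × Int) j =>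
              if PySem.List.pyGetD walls j 0 > p.1 then (PySem.List.pyGetD walls j 0, p.2 + 1)
              else p)
            (PySem.List.pyGetD walls i 0, 0)
        stack ++ [p.2]) acc
      = acc ++ pvSpecOut (walls.drop k) := by
  intro n
  induction n with
  | zero =>
    intro k hk acc
    rw [PySem.List.pyRange_one_eq_nil (by omega), List.drop_eq_nil_of_le (by omega)]
    simp [pvSpecOut]
  | succ n ih =>
    intro k hk acc
    have hklt : k < walls.length := by omega
    rw [PySem.List.pyRange_one_cons (by exact_mod_cast hklt), List.foldl_cons]
    have hcast : (k : Int) + 1 = ((k + 1 : Nat) : Int) := by push_cast; ring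
    rw [hcast, ih (k + 1) (by omega)]
    -- evaluate the body at index k
    have hget : PySem.List.pyGetD walls (k : Int) 0 = walls[k] := by
      rw [PySem.List.pyGetD_natCast, List.getD_eq_getElem walls 0 hklt]
    have hinner :
        (PySem.List.pyRange (k : Int) (walls.length : Int) 1).foldl
          (fun (p : Int × Int) j =>
            if PySem.List.pyGetD walls j 0 > p.1 then (PySem.List.pyGetD walls j 0, p.2 + 1)
            else p)
          (PySem.List.pyGetD walls (k : Int) 0, 0)
        = (walls.drop k).foldl
            (fun (p : Int × Int) w => if w > p.1 then (w, p.2 + 1) else p)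
            (PySem.List.pyGetD walls (k : Int) 0, 0) := by
      rw [PySem.List.foldl_pyRange_pyGetD' walls 0
        (fun (p : Int × Int) w => if w > p.1 then (w, p.2 + 1) else p) _ (by positivity)]
      simp
    have hdrop : walls.drop k = walls[k] :: walls.drop (k + 1) :=
      List.drop_eq_getElem_cons hklt
    simp only [hinner]
    rw [hget, hdrop, List.foldl_cons]
    simp [pv_inner_fold, pvSpecOut]
theorem pvA_eq (walls : List Int) : check_walls_cover walls = pvSpecOut walls := by
  unfold check_walls_cover
  have := pv_outer walls walls.length 0 (by omega) []
  simpa using this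

-- ===== VERDICT (by name: the statement is the Claim_ definition above) =====
theorem check_walls_cover_spec : Claim_equal_check_walls_cover := by
  intro walls _
  unfold Spec_check_walls_cover
  rw [pvA_eq, pv_B_eq]
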